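-- pv_equiv track=rewrite | github.com/WassabiVl/SearchBased | ex2/run_genetic_alg.py | assess_fitness
-- ===== SOURCE A (Python) =====
-- def assess_fitness(solution, features, interaction):
--     """Sum up the total performance value of the solution"""
--     result = 0
--     # add the features first
--     for i, k in enumerate(solution):
--         if k == 1:
--             result += features[i]
--     # add the interactions second
--     for i, k in enumerate(solution):
--         for x, y in enumerate(solution):
--             if k == 1 and y == 1:
--                 try:
--                     result += interaction[i, x]
--                 except KeyError:
--                     continue
--                 else:
--                     result += interaction[i, x]
--     return result
-- ===== SOURCE B (Python) =====
-- def assess_fitness(solution, features, interaction):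
--     """Sum up the total performance value of the solution"""
--     selected = {i for i, k in enumerate(solution) if k == 1}
--     total = sum(f for k, f in zip(solution, features) if k == 1)
--     total += 2 * sum(v for (i, x), v in interaction.items()
--                      if i in selected and x in selected)
--     return total
-- ===== Notes on version B (the rewrite author's own statement) =====
-- stated objective: faster
-- what changed: B replaces A's nested double loop over all index pairs (each doing a dict lookup, value added twice by the try/else) with one selected-index set, a zip-based feature sum, and a single pass over the interaction dict entries doubling each entry whose both endpoints are selected.
import Mathlib
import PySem

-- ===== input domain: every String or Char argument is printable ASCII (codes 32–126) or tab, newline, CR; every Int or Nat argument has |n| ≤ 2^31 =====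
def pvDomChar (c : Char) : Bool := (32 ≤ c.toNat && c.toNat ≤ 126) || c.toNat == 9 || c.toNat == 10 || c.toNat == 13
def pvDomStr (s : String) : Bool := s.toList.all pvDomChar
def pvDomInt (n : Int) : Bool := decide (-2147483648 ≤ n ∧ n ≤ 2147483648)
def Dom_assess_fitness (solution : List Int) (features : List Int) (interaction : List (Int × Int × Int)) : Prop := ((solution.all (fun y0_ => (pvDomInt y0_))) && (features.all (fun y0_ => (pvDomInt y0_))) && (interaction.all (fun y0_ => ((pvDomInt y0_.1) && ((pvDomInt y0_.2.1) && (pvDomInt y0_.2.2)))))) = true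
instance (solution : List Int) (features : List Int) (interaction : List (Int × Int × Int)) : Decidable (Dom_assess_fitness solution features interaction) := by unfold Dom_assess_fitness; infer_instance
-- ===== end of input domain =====

-- B replaces A's quadratic double scan over all index pairs by a single pass over the
-- interaction entries (doubling each selected entry) plus a zip for the feature sum (objective: faster).


-- ===== PORT A =====
def assess_fitness (solution : List Int) (features : List Int) (interaction : List (Int × Int × Int)) : Int :=
  let result := (PySem.List.enumerate solution).foldl
      (fun r p => if p.2 = 1 then r + PySem.List.pyGetD features p.1 0 else r) 0
  (PySem.List.enumerate solution).foldl
    (fun (r : Int) (p : Int × Int) =>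
      (PySem.List.enumerate solution).foldl
        (fun (r : Int) (q : Int × Int) =>
          if p.2 = 1 ∧ q.2 = 1 then
            match interaction.find? (fun t => t.1 == p.1 && t.2.1 == q.1) with
            | some t => r + t.2.2 + t.2.2   -- 'try/else' both add: the value is added twice
            | none => r
          else r)
        r)
    result

-- ===== PORT B =====
def assess_fitness_alt (solution : List Int) (features : List Int) (interaction : List (Int × Int × Int)) : Int :=
  let selected : PySem.Set Int :=
    PySem.Set.ofList (((PySem.List.enumerate solution).filter (fun p => p.2 == 1)).map (fun p => p.1))
  let total := (solution.zip features).foldl (fun a q => if q.1 = 1 then a + q.2 else a) 0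
  total + 2 * interaction.foldl
      (fun a t => if PySem.Set.contains selected t.1 && PySem.Set.contains selected t.2.1
                  then a + t.2.2 else a) 0

-- ===== PRECONDITION & SPEC =====
-- Pre_ excludes (i) inputs where A raises IndexError (a selected index beyond features),
-- and (ii) Lean association lists with duplicate interaction keys, which do not represent any Python dict.
def Pre_assess_fitness (solution : List Int) (features : List Int) (interaction : List (Int × Int × Int)) : Prop :=
  1 ∉ solution.drop features.length ∧ (interaction.map (fun t => (t.1, t.2.1))).Nodup
instance (solution : List Int) (features : List Int) (interaction : List (Int × Int × Int)) : Decidable (Pre_assess_fitness solution features interaction) := by unfold Pre_assess_fitness; infer_instance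

def pvWitness_assess_fitness : List Int × List Int × (List (Int × Int × Int)) :=
  ([1, 0, 1], [5, 6, 7], [(0, 2, 4), (2, 2, 1), (9, 9, 3)])

def Spec_assess_fitness (solution : List Int) (features : List Int) (interaction : List (Int × Int × Int)) (out : Int) : Prop := out = assess_fitness_alt solution features interaction
instance (solution : List Int) (features : List Int) (interaction : List (Int × Int × Int)) (out : Int) : Decidable (Spec_assess_fitness solution features interaction out) := by unfold Spec_assess_fitness; infer_instance

-- ===== CLAIM (what is proved, stated in full; the proofs are below) =====
def Claim_equal_assess_fitness : Prop := ∀ (solution : List Int) (features : List Int) (interaction : List (Int × Int × Int)), Dom_assess_fitness solution features interaction → Pre_assess_fitness solution features interaction → Spec_assess_fitness solution features interaction (assess_fitness solution features interaction)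

-- ===== LEMMAS AND PROOFS =====

-- value A adds (once) for a selected pair (i, x): first matching interaction entry, else 0
def pvLookup (interaction : List (Int × Int × Int)) (i x : Int) : Int :=
  ((interaction.find? (fun t => t.1 == i && t.2.1 == x)).map (fun t => t.2.2)).getD 0

-- the selected indices, in order
def pvSel (solution : List Int) : List Int :=
  ((PySem.List.enumerate solution).filter (fun p => p.2 == 1)).map (fun p => p.1)

-- all selected index pairs
def pvPairs (solution : List Int) : List (Int × Int) :=
  (pvSel solution).flatMap (fun i => (pvSel solution).map (fun x => (i, x)))

lemma pyGetD_cons_succ (f : Int) (fs : List Int) (i : Int) (h : 0 ≤ i) :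
    PySem.List.pyGetD (f :: fs) (i + 1) 0 = PySem.List.pyGetD fs i 0 := by
  obtain ⟨n, rfl⟩ := Int.eq_ofNat_of_zero_le h
  have : ((n : Int) + 1) = ((n + 1 : Nat) : Int) := by push_cast; ring
  rw [this, PySem.List.pyGetD_natCast, PySem.List.pyGetD_natCast]
  simp

lemma feat_shift (f : Int) (fs : List Int) (xs : List Int) :
    ∀ (st : Int) (a : Int), 0 ≤ st →
    (PySem.List.enumerate xs (st + 1)).foldl
        (fun r p => if p.2 = 1 then r + PySem.List.pyGetD (f :: fs) p.1 0 else r) a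
      = (PySem.List.enumerate xs st).foldl
        (fun r p => if p.2 = 1 then r + PySem.List.pyGetD fs p.1 0 else r) a := by
  induction xs with
  | nil => intro st a _; simp [PySem.List.enumerate_nil]
  | cons x xs ih =>
    intro st a hst
    rw [PySem.List.enumerate_cons, PySem.List.enumerate_cons]
    simp only [List.foldl_cons]
    rw [pyGetD_cons_succ f fs st hst]
    exact ih (st + 1) _ (by omega)

lemma feat_none (feats : List Int) (xs : List Int) :
    ∀ (st a : Int), (1:Int) ∉ xs →
    (PySem.List.enumerate xs st).foldl
        (fun r p => if p.2 = 1 then r + PySem.List.pyGetD feats p.1 0 else r) a = a := by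
  induction xs with
  | nil => intro st a _; simp [PySem.List.enumerate_nil]
  | cons x xs ih =>
    intro st a h
    rw [PySem.List.enumerate_cons]
    simp only [List.foldl_cons]
    have hx : x ≠ 1 := fun hh => h (by simp [hh])
    rw [if_neg hx]
    exact ih _ _ (fun hh => h (by simp [hh]))

lemma feat_eq_zip (solution features : List Int) (a : Int)
    (h : (1:Int) ∉ solution.drop features.length) :
    (PySem.List.enumerate solution).foldl
        (fun r p => if p.2 = 1 then r + PySem.List.pyGetD features p.1 0 else r) a
      = (solution.zip features).foldl (fun a q => if q.1 = 1 then a + q.2 else a) a := by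
  induction solution generalizing features a with
  | nil => simp [PySem.List.enumerate_nil]
  | cons s sol ih =>
    cases features with
    | nil =>
      simp only [List.length_nil, List.drop_zero] at h
      simp only [List.zip_nil_right, List.foldl_nil]
      exact feat_none [] (s :: sol) 0 a h
    | cons f fs =>
      rw [PySem.List.enumerate_cons]
      simp only [List.foldl_cons, List.zip_cons_cons]
      have h' : (1:Int) ∉ sol.drop fs.length := by simpa using h
      have hget : PySem.List.pyGetD (f :: fs) (0:Int) 0 = f := by
        simp [PySem.List.pyGetD_zero_cons]
      rw [hget, feat_shift f fs sol 0 _ (by omega)]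
      split_ifs <;> exact ih fs _ h'

lemma sum_map_update (P : List (Int × Int)) (key : Int × Int) (c : Int) (g : Int × Int → Int)
    (hP : P.Nodup) (hg : g key = 0) :
    (P.map (fun p => if p = key then c else g p)).sum
      = (if key ∈ P then c else 0) + (P.map g).sum := by
  induction P with
  | nil => simp
  | cons q P ih =>
    rcases List.nodup_cons.mp hP with ⟨hq, hP'⟩
    by_cases h : q = key
    · subst h
      have hmap : P.map (fun p => if p = q then c else g p) = P.map g :=
        List.map_congr_left (fun p hp => by
          have : p ≠ q := fun hh => hq (hh ▸ hp)
          simp [this])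
      simp [hmap, hg]
    · have hkey : (key ∈ q :: P) ↔ key ∈ P := by
        constructor
        · intro hh
          rcases List.mem_cons.mp hh with hh | hh
          · exact absurd hh.symm h
          · exact hh
        · exact List.mem_cons_of_mem q
      simp only [List.map_cons, List.sum_cons, if_neg h, ih hP']
      rw [if_congr hkey rfl rfl]
      ring

lemma lookup_cons (t : Int × Int × Int) (tl : List (Int × Int × Int)) (p : Int × Int) :
    pvLookup (t :: tl) p.1 p.2 = if p = (t.1, t.2.1) then t.2.2 else pvLookup tl p.1 p.2 := by
  unfold pvLookup
  rw [List.find?_cons]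
  by_cases h : p = (t.1, t.2.1)
  · have : (t.1 == p.1 && t.2.1 == p.2) = true := by subst h; simp
    simp [h]
  · have : (t.1 == p.1 && t.2.1 == p.2) = false := by
      rcases p with ⟨a, b⟩
      by_cases h1 : t.1 = a <;> by_cases h2 : t.2.1 = b <;> simp_all [Prod.ext_iff]
    simp [this, h]

lemma lookup_not_mem (tl : List (Int × Int × Int)) (p : Int × Int)
    (h : p ∉ tl.map (fun t => (t.1, t.2.1))) : pvLookup tl p.1 p.2 = 0 := by
  unfold pvLookup
  have : tl.find? (fun t => t.1 == p.1 && t.2.1 == p.2) = none := by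
    rw [List.find?_eq_none]
    intro t ht hc
    apply h
    rcases Bool.and_eq_true_iff.mp hc with ⟨h1, h2⟩
    have h1 := beq_iff_eq.mp h1
    have h2 := beq_iff_eq.mp h2
    exact List.mem_map.mpr ⟨t, ht, by simp [h1, h2]⟩
  simp [this]

-- Σ over a nodup pair list of first-match lookups = Σ over entries whose key is in the list
lemma lookup_sum_eq (interaction : List (Int × Int × Int)) (P : List (Int × Int))
    (hI : (interaction.map (fun t => (t.1, t.2.1))).Nodup) (hP : P.Nodup) :
    (P.map (fun p => pvLookup interaction p.1 p.2)).sum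
      = (interaction.map (fun t => if (t.1, t.2.1) ∈ P then t.2.2 else 0)).sum := by
  induction interaction with
  | nil =>
    have : ∀ p ∈ P, pvLookup [] p.1 p.2 = 0 := fun p _ => by simp [pvLookup]
    simp [List.map_congr_left this]
  | cons t tl ih =>
    rcases List.nodup_cons.mp hI with ⟨ht, htl⟩
    have hmap : P.map (fun p => pvLookup (t :: tl) p.1 p.2)
        = P.map (fun p => if p = (t.1, t.2.1) then t.2.2 else pvLookup tl p.1 p.2) :=
      List.map_congr_left (fun p _ => lookup_cons t tl p)
    rw [hmap, sum_map_update P (t.1, t.2.1) t.2.2 _ hP (lookup_not_mem tl _ ht), ih htl]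
    simp

lemma pvSel_nodup (solution : List Int) : (pvSel solution).Nodup := by
  have h1 : List.Sublist (((PySem.List.enumerate solution).filter (fun p => p.2 == 1)).map (fun p : Int × Int => p.1))
      ((PySem.List.enumerate solution).map (fun p : Int × Int => p.1)) :=
    List.Sublist.map _ List.filter_sublist
  have h2 : ((PySem.List.enumerate solution).map (fun p : Int × Int => p.1)).Nodup := by
    rw [PySem.List.map_fst_enumerate]
    exact PySem.List.nodup_pyRange_one _ _
  exact h2.sublist h1

lemma pvPairs_nodup (solution : List Int) : (pvPairs solution).Nodup := by
  have := List.Nodup.product (pvSel_nodup solution) (pvSel_nodup solution)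
  simpa [pvPairs, List.product, SProd.sprod] using this

lemma sum_map_if_filter {α : Type} (l : List α) (p : α → Bool) (g : α → Int) :
    (l.map (fun x => if p x then g x else 0)).sum = ((l.filter p).map g).sum := by
  induction l with
  | nil => simp
  | cons x xs ih => by_cases h : p x <;> simp [h, ih]

lemma sum_flatMap_pairs (S : List Int) (f : Int × Int → Int) :
    ((S.flatMap (fun i => S.map (fun x => ((i, x) : Int × Int)))).map f).sum
      = (S.map (fun i => ((S.map (fun x => f (i, x))).sum))).sum := by
  rw [List.map_flatMap, List.flatMap, List.sum_flatten, List.map_map]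
  simp [Function.comp_def, List.map_map]

lemma interA_eq (solution : List Int) (interaction : List (Int × Int × Int)) (r0 : Int) :
    (PySem.List.enumerate solution).foldl
      (fun (r : Int) (p : Int × Int) =>
        (PySem.List.enumerate solution).foldl
          (fun (r : Int) (q : Int × Int) =>
            if p.2 = 1 ∧ q.2 = 1 then
              match interaction.find? (fun t => t.1 == p.1 && t.2.1 == q.1) with
              | some t => r + t.2.2 + t.2.2
              | none => r
            else r)
          r)
      r0
    = r0 + 2 * ((pvPairs solution).map (fun p => pvLookup interaction p.1 p.2)).sum := by
  have hstep : ∀ (p : Int × Int),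
      (fun (r : Int) (q : Int × Int) =>
        if p.2 = 1 ∧ q.2 = 1 then
          match interaction.find? (fun t => t.1 == p.1 && t.2.1 == q.1) with
          | some t => r + t.2.2 + t.2.2
          | none => r
        else r)
      = fun (r : Int) (q : Int × Int) =>
          r + (if p.2 = 1 ∧ q.2 = 1 then 2 * pvLookup interaction p.1 q.1 else 0) := by
    intro p
    funext r q
    by_cases h : p.2 = 1 ∧ q.2 = 1
    · rw [if_pos h, if_pos h]
      rcases hf : interaction.find? (fun t => t.1 == p.1 && t.2.1 == q.1) with _ | t
      · simp [pvLookup, hf]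
      · simp [pvLookup, hf]; ring
    · rw [if_neg h, if_neg h]; ring
  have houter :
      (fun (r : Int) (p : Int × Int) =>
        (PySem.List.enumerate solution).foldl
          (fun (r : Int) (q : Int × Int) =>
            if p.2 = 1 ∧ q.2 = 1 then
              match interaction.find? (fun t => t.1 == p.1 && t.2.1 == q.1) with
              | some t => r + t.2.2 + t.2.2
              | none => r
            else r)
          r)
      = fun (r : Int) (p : Int × Int) =>
          r + ((PySem.List.enumerate solution).map
            (fun q => if p.2 = 1 ∧ q.2 = 1 then 2 * pvLookup interaction p.1 q.1 else 0)).sum := by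
    funext r p
    rw [hstep p, PySem.List.foldl_add]
  rw [houter, PySem.List.foldl_add]
  congr 1
  have h1 : ∀ (p : Int × Int),
      ((PySem.List.enumerate solution).map
        (fun q => if p.2 = 1 ∧ q.2 = 1 then 2 * pvLookup interaction p.1 q.1 else 0)).sum
      = if p.2 = 1 then 2 * ((pvSel solution).map (fun x => pvLookup interaction p.1 x)).sum else 0 := by
    intro p
    by_cases hp : p.2 = 1
    · simp only [hp, true_and, if_pos]
      have : (fun (q : Int × Int) => if q.2 = 1 then 2 * pvLookup interaction p.1 q.1 else 0)
           = (fun (q : Int × Int) => if (fun (q : Int × Int) => q.2 == 1) q then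
               (fun (q : Int × Int) => 2 * pvLookup interaction p.1 q.1) q else 0) := by
        funext q; by_cases h : q.2 = 1 <;> simp [h]
      rw [this, sum_map_if_filter]
      unfold pvSel
      rw [List.map_map, ← List.sum_map_mul_left]
      rfl
    · simp [hp]
  rw [List.map_congr_left (fun p _ => h1 p)]
  have : (fun (p : Int × Int) => if p.2 = 1 then 2 * ((pvSel solution).map (fun x => pvLookup interaction p.1 x)).sum else 0)
       = (fun (p : Int × Int) => if (fun (p : Int × Int) => p.2 == 1) p then
           (fun (p : Int × Int) => 2 * ((pvSel solution).map (fun x => pvLookup interaction p.1 x)).sum) p else 0) := by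
    funext p; by_cases h : p.2 = 1 <;> simp [h]
  rw [this, sum_map_if_filter]
  unfold pvPairs
  rw [sum_flatMap_pairs]
  unfold pvSel
  rw [List.map_map, ← List.sum_map_mul_left]
  rfl

lemma mem_pvPairs (solution : List Int) (i x : Int) :
    (i, x) ∈ pvPairs solution ↔ i ∈ pvSel solution ∧ x ∈ pvSel solution := by
  simp [pvPairs, List.mem_flatMap]

lemma interB_eq (solution : List Int) (interaction : List (Int × Int × Int)) :
    interaction.foldl
      (fun a t => if PySem.Set.contains (PySem.Set.ofList (pvSel solution)) t.1
                     && PySem.Set.contains (PySem.Set.ofList (pvSel solution)) t.2.1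
                  then a + t.2.2 else a) 0
    = (interaction.map (fun t => if (t.1, t.2.1) ∈ pvPairs solution then t.2.2 else 0)).sum := by
  have hstep : (fun (a : Int) (t : Int × Int × Int) =>
      if PySem.Set.contains (PySem.Set.ofList (pvSel solution)) t.1
         && PySem.Set.contains (PySem.Set.ofList (pvSel solution)) t.2.1
      then a + t.2.2 else a)
      = fun (a : Int) (t : Int × Int × Int) =>
          a + (if (t.1, t.2.1) ∈ pvPairs solution then t.2.2 else 0) := by
    funext a t
    have hc : (PySem.Set.contains (PySem.Set.ofList (pvSel solution)) t.1
        && PySem.Set.contains (PySem.Set.ofList (pvSel solution)) t.2.1) = true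
        ↔ (t.1, t.2.1) ∈ pvPairs solution := by
      rw [Bool.and_eq_true_iff, PySem.Set.contains_iff, PySem.Set.contains_iff,
        PySem.Set.mem_ofList, PySem.Set.mem_ofList, mem_pvPairs]
    by_cases h : (t.1, t.2.1) ∈ pvPairs solution
    · rw [if_pos (hc.mpr h), if_pos h]
    · rw [if_neg (fun hh => h (hc.mp hh)), if_neg h]; ring
  rw [hstep, PySem.List.foldl_add]
  simp

-- ===== VERDICT (by name: the statement is the Claim_ definition above) =====
theorem assess_fitness_spec : Claim_equal_assess_fitness := by
  intro solution features interaction _ hpre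
  unfold Spec_assess_fitness
  show assess_fitness solution features interaction = assess_fitness_alt solution features interaction
  unfold assess_fitness assess_fitness_alt
  rw [feat_eq_zip solution features 0 hpre.1]
  rw [interA_eq solution interaction _]
  rw [lookup_sum_eq interaction (pvPairs solution) hpre.2 (pvPairs_nodup solution)]
  rw [← interB_eq solution interaction]
  rfl
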